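-- pv_equiv track=rewrite | github.com/lrivals/cl-embedded | src/evaluation/compute_cost.py | training_macs_kmeans
-- ===== SOURCE A (Python) =====
-- def training_macs_kmeans(
--     n_features: int,
--     n_clusters: int,
--     n_samples: int,
--     k_min: int,
--     k_max: int,
--     n_init: int,
--     max_iter: int,
-- ) -> int:
--     """MACs d'entraînement KMeans avec sélection K par silhouette.
--
--     Trois phases :
--     - K-selection : sum_{k=k_min}^{k_max} n_init × max_iter × n_samples × k × n_features
--     - Silhouette  : (k_max-k_min+1) × n_samples² × n_features  (distances pairwise)
--     - Final fit   : n_init × max_iter × n_samples × n_clusters × n_features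
--
--     Parameters
--     ----------
--     n_features : int
--         Dimension du vecteur d'entrée.
--     n_clusters : int
--         K retenu pour le fit final.
--     n_samples : int
--         Nombre d'échantillons d'entraînement.
--     k_min, k_max : int
--         Borne de la grille de recherche K.
--     n_init : int
--         Nombre de restarts aléatoires par K.
--     max_iter : int
--         Nombre maximum d'itérations Lloyd.
--     """
--     k_select = sum(
--         n_init * max_iter * n_samples * k * n_features
--         for k in range(k_min, k_max + 1)
--     )
--     silhouette = (k_max - k_min + 1) * n_samples**2 * n_features
--     final_fit = n_init * max_iter * n_samples * n_clusters * n_features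
--     return k_select + silhouette + final_fit
-- ===== SOURCE B (Python) =====
-- def training_macs_kmeans(
--     n_features: int,
--     n_clusters: int,
--     n_samples: int,
--     k_min: int,
--     k_max: int,
--     n_init: int,
--     max_iter: int,
-- ) -> int:
--     # Closed-form arithmetic series instead of looping over the K grid.
--     span = k_max - k_min + 1
--     sum_k = (k_min + k_max) * span // 2 if span > 0 else 0
--     return (
--         n_init * max_iter * n_samples * n_features * sum_k
--         + span * n_samples ** 2 * n_features
--         + n_init * max_iter * n_samples * n_clusters * n_features
--     )
-- ===== Notes on version B (the rewrite author's own statement) =====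
-- stated objective: faster
-- what changed: Replaces the O(k_max-k_min) generator-sum over the K grid with the closed-form arithmetic-series formula (k_min+k_max)*span//2, making the whole computation O(1).
import Mathlib
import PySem

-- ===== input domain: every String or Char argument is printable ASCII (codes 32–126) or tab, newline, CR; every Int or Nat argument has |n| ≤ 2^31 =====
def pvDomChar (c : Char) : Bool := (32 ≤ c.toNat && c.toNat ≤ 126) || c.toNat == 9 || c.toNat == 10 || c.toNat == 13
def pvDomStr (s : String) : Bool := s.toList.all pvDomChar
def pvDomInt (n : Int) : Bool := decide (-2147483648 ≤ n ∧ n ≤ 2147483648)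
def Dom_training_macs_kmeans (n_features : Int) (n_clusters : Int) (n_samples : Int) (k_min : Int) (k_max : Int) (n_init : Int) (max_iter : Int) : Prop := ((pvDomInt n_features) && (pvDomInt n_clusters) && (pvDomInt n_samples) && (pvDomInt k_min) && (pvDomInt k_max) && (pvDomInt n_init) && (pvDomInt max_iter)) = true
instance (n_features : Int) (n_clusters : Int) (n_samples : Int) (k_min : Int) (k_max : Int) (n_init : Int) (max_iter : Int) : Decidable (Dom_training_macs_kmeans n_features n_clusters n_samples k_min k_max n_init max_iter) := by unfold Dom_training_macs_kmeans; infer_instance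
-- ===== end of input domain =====

-- B replaces the loop over the K grid by the closed-form arithmetic series (objective: faster).
-- ===== PORT A =====
def training_macs_kmeans (n_features : Int) (n_clusters : Int) (n_samples : Int) (k_min : Int) (k_max : Int) (n_init : Int) (max_iter : Int) : Int :=
  let k_select := (PySem.List.pyRange k_min (k_max + 1) 1).foldl
    (fun s k => s + n_init * max_iter * n_samples * k * n_features) 0
  let silhouette := (k_max - k_min + 1) * n_samples ^ 2 * n_features
  let final_fit := n_init * max_iter * n_samples * n_clusters * n_features
  k_select + silhouette + final_fit

-- ===== PORT B =====
def training_macs_kmeans_alt (n_features : Int) (n_clusters : Int) (n_samples : Int) (k_min : Int) (k_max : Int) (n_init : Int) (max_iter : Int) : Int :=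
  let span := k_max - k_min + 1
  let sum_k := if span > 0 then PySem.Int.floordiv ((k_min + k_max) * span) 2 else 0
  n_init * max_iter * n_samples * n_features * sum_k
    + span * n_samples ^ 2 * n_features
    + n_init * max_iter * n_samples * n_clusters * n_features

-- ===== PRECONDITION & SPEC =====
def Spec_training_macs_kmeans (n_features : Int) (n_clusters : Int) (n_samples : Int) (k_min : Int) (k_max : Int) (n_init : Int) (max_iter : Int) (out : Int) : Prop := out = training_macs_kmeans_alt n_features n_clusters n_samples k_min k_max n_init max_iter
instance (n_features : Int) (n_clusters : Int) (n_samples : Int) (k_min : Int) (k_max : Int) (n_init : Int) (max_iter : Int) (out : Int) : Decidable (Spec_training_macs_kmeans n_features n_clusters n_samples k_min k_max n_init max_iter out) := by unfold Spec_training_macs_kmeans; infer_instance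

-- ===== CLAIM (what is proved, stated in full; the proofs are below) =====
def Claim_equal_training_macs_kmeans : Prop := ∀ (n_features : Int) (n_clusters : Int) (n_samples : Int) (k_min : Int) (k_max : Int) (n_init : Int) (max_iter : Int), Dom_training_macs_kmeans n_features n_clusters n_samples k_min k_max n_init max_iter → Spec_training_macs_kmeans n_features n_clusters n_samples k_min k_max n_init max_iter (training_macs_kmeans n_features n_clusters n_samples k_min k_max n_init max_iter)

-- ===== LEMMAS AND PROOFS =====

-- ===== VERDICT (by name: the statement is the Claim_ definition above) =====
-- fold of (s + f k) over a list is the sum of the mapped list, shifted by the accumulator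
lemma foldl_add_eq_sum (f : Int → Int) : ∀ (l : List Int) (s : Int),
    l.foldl (fun s k => s + f k) s = s + (l.map f).sum := by
  intro l
  induction l with
  | nil => simp
  | cons x xs ih => intro s; simp [List.foldl, ih]; ring

-- doubled arithmetic series over List.range
lemma two_mul_sum_range (c d a : Int) : ∀ (n : Nat),
    2 * (((List.range n).map (fun k : Nat => c * (a + (k : Int)) * d)).sum)
      = c * d * (2 * a + n - 1) * n := by
  intro n
  induction n with
  | zero => simp
  | succ m ih =>
    rw [List.range_succ]
    simp only [List.map_append, List.sum_append, List.map_cons, List.map_nil,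
      List.sum_cons, List.sum_nil]
    push_cast
    push_cast at ih
    linarith [ih]

theorem training_macs_kmeans_spec : Claim_equal_training_macs_kmeans := by
  intro nf nc ns kmin kmax ninit maxiter _
  unfold Spec_training_macs_kmeans training_macs_kmeans training_macs_kmeans_alt
  simp only [PySem.List.pyRange_one]
  rw [foldl_add_eq_sum, List.map_map]
  by_cases h : kmax - kmin + 1 > 0
  · rw [if_pos h]
    set n : Nat := (kmax + 1 - kmin).toNat with hn
    have hns : (n : Int) = kmax - kmin + 1 := by omega
    -- the plain arithmetic series
    set M : Int := ((List.range n).map (fun k : Nat => kmin + (k : Int))).sum with hM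
    have h2' : 2 * M = (2 * kmin + (n : Int) - 1) * n := by
      have := two_mul_sum_range 1 1 kmin n
      simp only [one_mul, mul_one] at this
      rw [hM]; exact this
    have hM2 : 2 * M = (kmin + kmax) * (kmax - kmin + 1) := by
      rw [h2', hns]; ring
    -- the folded sum equals c * nf * M
    have hS : (((List.range n).map ((fun k => ninit * maxiter * ns * k * nf) ∘ fun k : Nat => kmin + (k : Int)))).sum
        = ninit * maxiter * ns * nf * M := by
      have h1 := two_mul_sum_range (ninit * maxiter * ns) nf kmin n
      have hcomp : ((List.range n).map ((fun k => ninit * maxiter * ns * k * nf) ∘ fun k : Nat => kmin + (k : Int))).sum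
          = ((List.range n).map (fun k : Nat => ninit * maxiter * ns * (kmin + (k : Int)) * nf)).sum := rfl
      rw [hcomp]
      have h3 : 2 * ((List.range n).map (fun k : Nat => ninit * maxiter * ns * (kmin + (k : Int)) * nf)).sum
          = 2 * (ninit * maxiter * ns * nf * M) := by
        linear_combination h1 - (ninit * maxiter * ns * nf) * h2'
      exact mul_left_cancel₀ two_ne_zero h3
    rw [hS]
    -- floordiv of the even product recovers M
    have hfd : PySem.Int.floordiv ((kmin + kmax) * (kmax - kmin + 1)) 2 = M := by
      rw [← hM2, PySem.Int.floordiv_eq_ediv_of_pos (by norm_num)]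
      omega
    rw [hfd]
    ring
  · rw [if_neg h]
    have : (kmax + 1 - kmin).toNat = 0 := by omega
    rw [this]
    simp
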